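-- pv_equiv track=rewrite | github.com/vladas9/AA_labs | lab2/merge_sort.py | merge_generator
-- ===== SOURCE A (Python) =====
-- def merge_generator(arr, left, mid, right):
--     left_part = arr[left:mid + 1]
--     right_part = arr[mid + 1:right + 1]
--
--     i = j = 0
--     k = left
--
--     while i < len(left_part) and j < len(right_part):
--         if left_part[i] <= right_part[j]:
--             arr[k] = left_part[i]
--             i += 1
--         else:
--             arr[k] = right_part[j]
--             j += 1
--         k += 1
--         yield arr.copy()
--
--     while i < len(left_part):
--         arr[k] = left_part[i]
--         i += 1
--         k += 1
--         yield arr.copy()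
--
--     while j < len(right_part):
--         arr[k] = right_part[j]
--         j += 1
--         k += 1
--         yield arr.copy()
-- ===== SOURCE B (Python) =====
-- def merge_generator(arr, left, mid, right):
--     left_part = arr[left:mid + 1]
--     right_part = arr[mid + 1:right + 1]
--
--     # pass 1: compute the fully merged block, no yields, no writes
--     merged = []
--     i = j = 0
--     while i < len(left_part) and j < len(right_part):
--         if left_part[i] <= right_part[j]:
--             merged.append(left_part[i])
--             i += 1
--         else:
--             merged.append(right_part[j])
--             j += 1
--     merged.extend(left_part[i:])
--     merged.extend(right_part[j:])
--
--     # pass 2: write back and emit one snapshot per placement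
--     for idx, val in enumerate(merged):
--         arr[left + idx] = val
--         yield arr.copy()
-- ===== Notes on version B (the rewrite author's own statement) =====
-- stated objective: alternative
-- what changed: B splits A's single yielding merge loop into two passes: a pure two-pointer merge that builds the merged block first, then a separate write-back pass that assigns and yields one snapshot per placement.
import Mathlib
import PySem

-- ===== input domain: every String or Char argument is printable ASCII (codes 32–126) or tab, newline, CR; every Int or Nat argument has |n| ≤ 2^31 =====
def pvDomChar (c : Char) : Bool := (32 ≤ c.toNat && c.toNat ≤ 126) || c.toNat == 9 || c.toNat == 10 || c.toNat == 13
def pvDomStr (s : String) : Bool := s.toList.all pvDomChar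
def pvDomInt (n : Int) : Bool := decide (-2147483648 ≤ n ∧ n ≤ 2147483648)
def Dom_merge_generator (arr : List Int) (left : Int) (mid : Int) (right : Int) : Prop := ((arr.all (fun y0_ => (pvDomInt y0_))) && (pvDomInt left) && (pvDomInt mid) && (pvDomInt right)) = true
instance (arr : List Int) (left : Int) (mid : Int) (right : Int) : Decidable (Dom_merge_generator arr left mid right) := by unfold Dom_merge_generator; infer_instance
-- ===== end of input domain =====

-- B restructures A's single yielding merge loop into a pure two-pointer merge pass followed by a
-- separate write-back/emit pass (objective: alternative decomposition, same cost). Both A and B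
-- mutate `arr` in place identically; the equivalence proved here is about the snapshot list returned.

-- ===== PORT A =====
-- A's trailing whiles 2 and 3 (copy the rest of one part, yielding after each write); used for both.
def mgA_copyRest (part : List Int) (arr : List Int) (k : Int) : List (List Int) :=
  match part with
  | [] => []
  | x :: rest =>
      let arr' := PySem.List.pySetD arr k x
      arr' :: mgA_copyRest rest arr' (k + 1)

-- A's first while: both parts nonempty, write the smaller head, yield a copy.
def mgA_mergeLoop : List Int → List Int → List Int → Int → List (List Int)
  | [], rp, arr, k => mgA_copyRest rp arr k
  | lp, [], arr, k => mgA_copyRest lp arr k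
  | x :: lp, y :: rp, arr, k =>
      if x ≤ y then
        let arr' := PySem.List.pySetD arr k x
        arr' :: mgA_mergeLoop lp (y :: rp) arr' (k + 1)
      else
        let arr' := PySem.List.pySetD arr k y
        arr' :: mgA_mergeLoop (x :: lp) rp arr' (k + 1)

def merge_generator (arr : List Int) (left : Int) (mid : Int) (right : Int) : List (List Int) :=
  let left_part := PySem.List.slice arr (some left) (some (mid + 1))
  let right_part := PySem.List.slice arr (some (mid + 1)) (some (right + 1))
  mgA_mergeLoop left_part right_part arr left

-- ===== PORT B =====
-- pass 1: pure two-pointer merge, no writes, no yields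
def mgB_merge : List Int → List Int → List Int
  | [], rp => rp
  | lp, [] => lp
  | x :: lp, y :: rp =>
      if x ≤ y then x :: mgB_merge lp (y :: rp) else y :: mgB_merge (x :: lp) rp

-- pass 2: write merged values back at left, left+1, …, yielding a copy after each write
def mgB_emit : List Int → List Int → Int → List (List Int)
  | [], _, _ => []
  | v :: vs, arr, k =>
      let arr' := PySem.List.pySetD arr k v
      arr' :: mgB_emit vs arr' (k + 1)

def merge_generator_alt (arr : List Int) (left : Int) (mid : Int) (right : Int) : List (List Int) :=
  let left_part := PySem.List.slice arr (some left) (some (mid + 1))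
  let right_part := PySem.List.slice arr (some (mid + 1)) (some (right + 1))
  mgB_emit (mgB_merge left_part right_part) arr left

-- ===== PRECONDITION & SPEC =====
-- Pre_ = exactly the inputs where Python A returns (no IndexError): either no element is written,
-- or every written index left … left+total-1 is a valid Python index of arr (−len ≤ k < len).
def Pre_merge_generator (arr : List Int) (left : Int) (mid : Int) (right : Int) : Prop :=
  ((PySem.List.slice arr (some left) (some (mid + 1))).length
    + (PySem.List.slice arr (some (mid + 1)) (some (right + 1))).length = 0)
  ∨ (-(arr.length : Int) ≤ left
      ∧ left + ((PySem.List.slice arr (some left) (some (mid + 1))).length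
          + (PySem.List.slice arr (some (mid + 1)) (some (right + 1))).length : Int) - 1 < arr.length)
instance (arr : List Int) (left : Int) (mid : Int) (right : Int) : Decidable (Pre_merge_generator arr left mid right) := by unfold Pre_merge_generator; infer_instance

def pvWitness_merge_generator : List Int × Int × Int × Int := ([2, 5, 1, 3], 0, 1, 3)

def Spec_merge_generator (arr : List Int) (left : Int) (mid : Int) (right : Int) (out : List (List Int)) : Prop := out = merge_generator_alt arr left mid right
instance (arr : List Int) (left : Int) (mid : Int) (right : Int) (out : List (List Int)) : Decidable (Spec_merge_generator arr left mid right out) := by unfold Spec_merge_generator; infer_instance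

-- ===== CLAIM (what is proved, stated in full; the proofs are below) =====
def Claim_equal_merge_generator : Prop := ∀ (arr : List Int) (left : Int) (mid : Int) (right : Int), Dom_merge_generator arr left mid right → Pre_merge_generator arr left mid right → Spec_merge_generator arr left mid right (merge_generator arr left mid right)

-- ===== LEMMAS AND PROOFS =====
-- A's leftover-copy whiles compute the same snapshots as B's emit pass on the leftover part.
theorem mgA_copyRest_eq_emit (part : List Int) (arr : List Int) (k : Int) :
    mgA_copyRest part arr k = mgB_emit part arr k := by
  induction part generalizing arr k with
  | nil => rfl
  | cons x rest ih => simp [mgA_copyRest, mgB_emit, ih]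

-- A's yielding merge loop = B's pure merge followed by B's emit pass.
theorem mgA_mergeLoop_eq (lp rp arr : List Int) (k : Int) :
    mgA_mergeLoop lp rp arr k = mgB_emit (mgB_merge lp rp) arr k := by
  induction lp generalizing rp arr k with
  | nil => simp [mgA_mergeLoop, mgB_merge, mgA_copyRest_eq_emit]
  | cons x lp ihL =>
    induction rp generalizing arr k with
    | nil => simp [mgA_mergeLoop, mgB_merge, mgA_copyRest_eq_emit]
    | cons y rp ihR =>
      by_cases h : x ≤ y
      · simp [mgA_mergeLoop, mgB_merge, mgB_emit, h, ihL]
      · simp [mgA_mergeLoop, mgB_merge, mgB_emit, h, ihR]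

-- ===== VERDICT (by name: the statement is the Claim_ definition above) =====
theorem merge_generator_spec : Claim_equal_merge_generator := by
  intro arr left mid right _ _
  unfold Spec_merge_generator merge_generator merge_generator_alt
  exact mgA_mergeLoop_eq _ _ _ _
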